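-- pv_equiv track=rewrite | github.com/qjpike/AoC2020 | 2020_11.py | chk_dn
-- ===== SOURCE A (Python) =====
-- def chk_dn(field,curr,x_len):
--     if curr + x_len < len(field):
--         if field[curr + x_len] == "#":
--             return True
--         elif field[curr + x_len] == "L":
--             return False
--         else:
--             return chk_dn(field,curr + x_len, x_len)
--     else:
--         return False
-- ===== SOURCE B (Python) =====
-- def chk_dn(field, curr, x_len):
--     # Iterate over the probed positions as an explicit range instead of tail recursion.
--     for pos in range(curr + x_len, len(field), x_len):
--         c = field[pos]
--         if c == "#":
--             return True
--         if c == "L":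
--             return False
--     return False
-- ===== Notes on version B (the rewrite author's own statement) =====
-- stated objective: simpler
-- what changed: Replaces A's tail recursion (re-calling itself with curr+x_len) by a flat for-loop over range(curr+x_len, len(field), x_len), probing the same cells in the same order.
-- outside the precondition, e.g. on chk_dn(['#', '.'], 0, -1): A returns True, B returns False; on chk_dn(['#'], 0, 0): A returns True, B raises ValueError
import Mathlib
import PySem

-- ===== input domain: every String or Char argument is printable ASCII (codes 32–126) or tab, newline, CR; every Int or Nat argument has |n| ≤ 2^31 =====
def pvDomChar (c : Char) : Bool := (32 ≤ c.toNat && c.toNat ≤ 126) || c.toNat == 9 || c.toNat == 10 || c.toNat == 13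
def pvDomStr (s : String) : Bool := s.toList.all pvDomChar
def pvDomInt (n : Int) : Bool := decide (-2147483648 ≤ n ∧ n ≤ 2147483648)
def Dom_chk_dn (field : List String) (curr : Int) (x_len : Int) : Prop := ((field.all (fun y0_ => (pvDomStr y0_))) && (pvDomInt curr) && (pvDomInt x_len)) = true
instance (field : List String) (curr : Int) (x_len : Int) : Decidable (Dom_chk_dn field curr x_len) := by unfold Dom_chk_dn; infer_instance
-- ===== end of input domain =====

-- B replaces A's tail recursion by a flat loop over range(curr+x_len, len(field), x_len) probing the same cells in the same order (objective: simpler).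


-- ===== PORT A =====
-- Tail recursion of A, totalized with fuel (fuel is ample under Pre_; the 'none' branch is Python's IndexError, excluded by Pre_).
def chk_dn_fuel (field : List String) (x_len : Int) : Nat → Int → Bool
  | 0, _ => false
  | fuel+1, curr =>
    if curr + x_len < (field.length : Int) then
      match PySem.List.pyGet? field (curr + x_len) with
      | none => false
      | some s =>
        if s = "#" then true
        else if s = "L" then false
        else chk_dn_fuel field x_len fuel (curr + x_len)
    else false

def chk_dn (field : List String) (curr : Int) (x_len : Int) : Bool :=
  chk_dn_fuel field x_len (2 * field.length + 1) curr

-- ===== PORT B =====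
-- B scans the precomputed list of probed positions range(curr+x_len, len(field), x_len).
def chk_dn_alt_scan (field : List String) : List Int → Bool
  | [] => false
  | pos :: rest =>
    match PySem.List.pyGet? field pos with
    | none => false
    | some c =>
      if c = "#" then true
      else if c = "L" then false
      else chk_dn_alt_scan field rest

def chk_dn_alt (field : List String) (curr : Int) (x_len : Int) : Bool :=
  chk_dn_alt_scan field (PySem.List.pyRange (curr + x_len) (field.length : Int) x_len)

-- ===== PRECONDITION & SPEC =====
-- Pre_ excludes non-positive steps x_len ≤ 0 (not a downward scan: A there recurses forever, raises, or reads via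
-- negative-index wraparound while B's range is empty or raises ValueError) and first probes below -len(field),
-- where A raises IndexError.
def Pre_chk_dn (field : List String) (curr : Int) (x_len : Int) : Prop :=
  1 ≤ x_len ∧ -(field.length : Int) ≤ curr + x_len
instance (field : List String) (curr : Int) (x_len : Int) : Decidable (Pre_chk_dn field curr x_len) := by unfold Pre_chk_dn; infer_instance
def pvWitness_chk_dn : List String × Int × Int := ([".", "#", "L"], 0, 1)

def Spec_chk_dn (field : List String) (curr : Int) (x_len : Int) (out : Bool) : Prop := out = chk_dn_alt field curr x_len
instance (field : List String) (curr : Int) (x_len : Int) (out : Bool) : Decidable (Spec_chk_dn field curr x_len out) := by unfold Spec_chk_dn; infer_instance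

-- ===== CLAIM (what is proved, stated in full; the proofs are below) =====
def Claim_equal_chk_dn : Prop := ∀ (field : List String) (curr : Int) (x_len : Int), Dom_chk_dn field curr x_len → Pre_chk_dn field curr x_len → Spec_chk_dn field curr x_len (chk_dn field curr x_len)

-- ===== LEMMAS AND PROOFS =====
theorem pyRange_pos_nil (a b s : Int) (hs : 0 < s) (hab : b ≤ a) :
    PySem.List.pyRange a b s = [] := by
  rw [PySem.List.pyRange_of_pos a b hs, if_neg (not_lt.2 hab)]
  simp

theorem pyRange_pos_cons (a b s : Int) (hs : 0 < s) (hab : a < b) :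
    PySem.List.pyRange a b s = a :: PySem.List.pyRange (a + s) b s := by
  rw [PySem.List.pyRange_of_pos a b hs, PySem.List.pyRange_of_pos (a + s) b hs]
  have hcount : ((b - a + s - 1) / s).toNat
      = (if a + s < b then ((b - (a + s) + s - 1) / s).toNat else 0) + 1 := by
    have h1 : b - a + s - 1 = (b - a - 1) + 1 * s := by ring
    have h2 : (b - a + s - 1) / s = (b - a - 1) / s + 1 := by
      rw [h1, Int.add_mul_ediv_right _ _ (by omega : s ≠ 0)]
    by_cases h : a + s < b
    · rw [if_pos h, h2]
      have h3 : b - (a + s) + s - 1 = b - a - 1 := by ring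
      have h4 : 0 ≤ (b - a - 1) / s := Int.ediv_nonneg (by omega) (by omega)
      rw [h3]; omega
    · rw [if_neg h, h2]
      have h5 : (b - a - 1) / s = 0 := Int.ediv_eq_zero_of_lt (by omega) (by omega)
      omega
  rw [if_pos hab, hcount, List.range_succ_eq_map]
  simp [Function.comp_def, List.map_map]
  intro k _
  ring

theorem chk_dn_key (field : List String) (x_len : Int) (hx : 1 ≤ x_len) :
    ∀ (fuel : Nat) (curr : Int), -(field.length : Int) ≤ curr + x_len →
      ((field.length : Int) - (curr + x_len)).toNat < fuel →
      chk_dn_fuel field x_len fuel curr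
        = chk_dn_alt_scan field (PySem.List.pyRange (curr + x_len) (field.length : Int) x_len) := by
  intro fuel
  induction fuel with
  | zero => intro curr _ h; omega
  | succ fuel ih =>
    intro curr hlow hfuel
    by_cases h : curr + x_len < (field.length : Int)
    · rw [pyRange_pos_cons _ _ _ (by omega) h]
      have hsome : ∃ c, PySem.List.pyGet? field (curr + x_len) = some c := by
        cases hc : PySem.List.pyGet? field (curr + x_len) with
        | none =>
          exfalso
          have := (PySem.List.pyGet?_eq_none_iff _ _).mp hc
          exact this ⟨by omega, by omega⟩
        | some c => exact ⟨c, rfl⟩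
      obtain ⟨c, hc⟩ := hsome
      show (if curr + x_len < (field.length : Int) then _ else _) = _
      rw [if_pos h, hc]
      simp only [chk_dn_alt_scan, hc]
      by_cases h1 : c = "#"
      · simp [h1]
      · by_cases h2 : c = "L"
        · simp [h2]
        · simp only [if_neg h1, if_neg h2]
          have := ih (curr + x_len) (by omega) (by omega)
          exact this
    · rw [pyRange_pos_nil _ _ _ (by omega) (by omega)]
      show (if curr + x_len < (field.length : Int) then _ else _) = _
      rw [if_neg h]
      rfl

-- ===== VERDICT (by name: the statement is the Claim_ definition above) =====
theorem chk_dn_spec : Claim_equal_chk_dn := by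
  intro field curr x_len _dom hpre
  obtain ⟨hx, hlow⟩ := hpre
  show chk_dn field curr x_len = chk_dn_alt field curr x_len
  unfold chk_dn chk_dn_alt
  exact chk_dn_key field x_len hx _ curr hlow (by omega)
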